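-- pv_equiv track=rewrite | github.com/EvelinSenghaas/Modelos-y-Simulacion | metodos.py | congruencial_multiplicativo
-- ===== SOURCE A (Python) =====
-- def congruencial_multiplicativo(s, n, a, m):
--     resultado = []
--     resultado.append(str(s))
--     secuencia = str(s)
--     i = 0
--     while i < n:
--         v = (a * int(resultado[i])) % m
--         resultado.append(str(v))
--         secuencia = str(v)
--         i += 1
--     return secuencia
-- ===== SOURCE B (Python) =====
-- def congruencial_multiplicativo(s, n, a, m):
--     # closed form: x_n = a^n * s (mod m), via built-in modular exponentiation
--     if n <= 0:
--         return str(s)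
--     return str(pow(a, n, m) * s % m)
-- ===== Notes on version B (the rewrite author's own statement) =====
-- stated objective: faster
-- what changed: Replaced the O(n) iteration (kept with string round-trips in a list) by the closed form a^n*s mod m computed with built-in modular exponentiation.
import Mathlib
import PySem

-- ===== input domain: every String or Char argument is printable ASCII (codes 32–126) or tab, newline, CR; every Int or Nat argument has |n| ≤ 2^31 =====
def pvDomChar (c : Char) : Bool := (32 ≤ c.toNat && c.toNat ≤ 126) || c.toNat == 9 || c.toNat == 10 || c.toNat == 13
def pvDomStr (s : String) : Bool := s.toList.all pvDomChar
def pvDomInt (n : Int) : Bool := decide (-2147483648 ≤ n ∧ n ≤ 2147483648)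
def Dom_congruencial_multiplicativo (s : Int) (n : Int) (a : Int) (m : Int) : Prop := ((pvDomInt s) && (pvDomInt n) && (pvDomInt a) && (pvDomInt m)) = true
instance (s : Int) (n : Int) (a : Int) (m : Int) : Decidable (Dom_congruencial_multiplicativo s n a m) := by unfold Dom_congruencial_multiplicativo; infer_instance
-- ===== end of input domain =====

-- B replaces A's O(n) loop by the closed form a^n*s mod m via modular exponentiation; the list/str-round-trip of A is carried as the Int it denotes (int(str(v)) = v).


-- ===== PORT A =====
-- while i < n: v = (a * int(resultado[i])) % m; resultado.append(str(v)); secuencia = str(v); i += 1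
-- Python stores str(v) in resultado and reads it back with int(); int(str(v)) = v on canonical
-- integer strings, so the port carries the Int value in resultado (str applied for secuencia).
def pvALoop (a : Int) (m : Int) : Nat → List Int → Nat → String → String
  | 0, _, _, secuencia => secuencia
  | fuel + 1, resultado, i, _ =>
    let x := (PySem.List.pyGet? resultado (Int.ofNat i)).getD 0   -- resultado[i] always in range
    let v := PySem.Int.mod (a * x) m
    pvALoop a m fuel (resultado ++ [v]) (i + 1) (PySem.Int.toStr v)

def congruencial_multiplicativo (s : Int) (n : Int) (a : Int) (m : Int) : String :=
  pvALoop a m n.toNat [s] 0 (PySem.Int.toStr s)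

-- ===== PORT B =====
def congruencial_multiplicativo_alt (s : Int) (n : Int) (a : Int) (m : Int) : String :=
  if n ≤ 0 then PySem.Int.toStr s
  else PySem.Int.toStr (PySem.Int.mod (PySem.Int.powMod a n.toNat m * s) m)

-- ===== PRECONDITION & SPEC =====
-- Pre_ excludes exactly m = 0 with n > 0, where A raises ZeroDivisionError (B raises ValueError there too).
def Pre_congruencial_multiplicativo (s : Int) (n : Int) (a : Int) (m : Int) : Prop := 0 < n → m ≠ 0
instance (s : Int) (n : Int) (a : Int) (m : Int) : Decidable (Pre_congruencial_multiplicativo s n a m) := by unfold Pre_congruencial_multiplicativo; infer_instance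
def pvWitness_congruencial_multiplicativo : Int × Int × Int × Int := (7, 5, 3, 11)

def Spec_congruencial_multiplicativo (s : Int) (n : Int) (a : Int) (m : Int) (out : String) : Prop := out = congruencial_multiplicativo_alt s n a m
instance (s : Int) (n : Int) (a : Int) (m : Int) (out : String) : Decidable (Spec_congruencial_multiplicativo s n a m out) := by unfold Spec_congruencial_multiplicativo; infer_instance

-- ===== CLAIM (what is proved, stated in full; the proofs are below) =====
def Claim_equal_congruencial_multiplicativo : Prop := ∀ (s : Int) (n : Int) (a : Int) (m : Int), Dom_congruencial_multiplicativo s n a m → Pre_congruencial_multiplicativo s n a m → Spec_congruencial_multiplicativo s n a m (congruencial_multiplicativo s n a m)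

-- ===== LEMMAS AND PROOFS =====

-- Python's floor-mod depends only on the residue class (any m ≠ 0)
theorem pvMod_congr (x y m : Int) (hm : m ≠ 0) (h : m ∣ x - y) :
    PySem.Int.mod x m = PySem.Int.mod y m := by
  have hx := PySem.Int.floordiv_mul_add_mod x m
  have hy := PySem.Int.floordiv_mul_add_mod y m
  obtain ⟨k, hk⟩ := h
  have hdif : PySem.Int.mod x m - PySem.Int.mod y m
      = m * (k - PySem.Int.floordiv x m + PySem.Int.floordiv y m) := by
    linear_combination hx - hy + hk
  rcases lt_or_gt_of_ne hm with hneg | hpos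
  · have h1 := PySem.Int.mod_neg_bounds x hneg
    have h2 := PySem.Int.mod_neg_bounds y hneg
    have : m * (k - PySem.Int.floordiv x m + PySem.Int.floordiv y m) = 0 := by
      rcases lt_trichotomy (k - PySem.Int.floordiv x m + PySem.Int.floordiv y m) 0 with h | h | h
      · nlinarith
      · simp [h]
      · nlinarith
    omega
  · have h1 := PySem.Int.mod_nonneg x hpos
    have h2 := PySem.Int.mod_lt x hpos
    have h3 := PySem.Int.mod_nonneg y hpos
    have h4 := PySem.Int.mod_lt y hpos
    have : m * (k - PySem.Int.floordiv x m + PySem.Int.floordiv y m) = 0 := by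
      rcases lt_trichotomy (k - PySem.Int.floordiv x m + PySem.Int.floordiv y m) 0 with h | h | h
      · nlinarith
      · simp [h]
      · nlinarith
    omega

theorem pvMod_sub_self (x m : Int) : m ∣ x - PySem.Int.mod x m := by
  have hx := PySem.Int.floordiv_mul_add_mod x m
  exact ⟨PySem.Int.floordiv x m, by linarith⟩

theorem pvGet_last (l : List Int) (y : Int) :
    PySem.List.pyGet? (l ++ [y]) (Int.ofNat l.length) = some y := by
  simp [PySem.List.pyGet?, PySem.List.pyIdx?]

-- loop invariant: the ith element of resultado is x; the loop returns str(a^fuel * x mod m)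
theorem pvALoop_eq (a m : Int) (hm : m ≠ 0) :
    ∀ (fuel : Nat) (resultado : List Int) (i : Nat) (x : Int) (sec : String),
    resultado.length = i + 1 →
    PySem.List.pyGet? resultado (Int.ofNat i) = some x →
    pvALoop a m fuel resultado i sec
      = if fuel = 0 then sec else PySem.Int.toStr (PySem.Int.mod (a ^ fuel * x) m) := by
  intro fuel
  induction fuel with
  | zero => intro resultado i x sec _ _; simp [pvALoop]
  | succ f ih =>
    intro resultado i x sec hlen hget
    simp only [pvALoop, hget, Option.getD_some]
    rw [ih (resultado ++ [PySem.Int.mod (a * x) m]) (i + 1) (PySem.Int.mod (a * x) m) _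
        (by simp [hlen]) (by rw [show Int.ofNat (i + 1) = Int.ofNat resultado.length by rw [hlen]]
                             exact pvGet_last resultado _)]
    rcases Nat.eq_zero_or_pos f with hf | hf
    · subst hf; simp [pow_one]
    · have hne : f ≠ 0 := Nat.pos_iff_ne_zero.mp hf
      simp only [if_neg hne, if_neg (Nat.succ_ne_zero f)]
      congr 1
      apply pvMod_congr _ _ _ hm
      have h1 : m ∣ a ^ f * (a * x - PySem.Int.mod (a * x) m) :=
        (pvMod_sub_self (a * x) m).mul_left _
      have h2 : a ^ f * PySem.Int.mod (a * x) m - a ^ (f + 1) * x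
          = -(a ^ f * (a * x - PySem.Int.mod (a * x) m)) := by ring
      rw [h2]
      exact dvd_neg.mpr h1

-- ===== VERDICT (by name: the statement is the Claim_ definition above) =====
theorem congruencial_multiplicativo_spec : Claim_equal_congruencial_multiplicativo := by
  intro s n a m _ hpre
  unfold Spec_congruencial_multiplicativo congruencial_multiplicativo congruencial_multiplicativo_alt
  by_cases hn : n ≤ 0
  · have : n.toNat = 0 := Int.toNat_of_nonpos hn
    simp [this, pvALoop, hn]
  · replace hn := lt_of_not_ge hn
    have hm : m ≠ 0 := hpre hn
    have hfuel : n.toNat ≠ 0 := by omega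
    rw [pvALoop_eq a m hm n.toNat [s] 0 s (PySem.Int.toStr s) (by simp)
        (by simp [PySem.List.pyGet?, PySem.List.pyIdx?])]
    simp only [if_neg hfuel, if_neg (not_le.mpr hn)]
    congr 1
    unfold PySem.Int.powMod
    apply pvMod_congr _ _ _ hm
    have h2 : a ^ n.toNat * s - PySem.Int.mod (a ^ n.toNat) m * s
        = (a ^ n.toNat - PySem.Int.mod (a ^ n.toNat) m) * s := by ring
    rw [h2]
    exact (pvMod_sub_self (a ^ n.toNat) m).mul_right s
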